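-- pv_equiv track=rewrite | github.com/grst/nanopore-notebooks | analysis_tools.py | gapmove
-- ===== SOURCE A (Python) =====
-- def gapmove(i_seq, ts, move):
--     """
--     moves by *move* steps, respecting gaps.
--     """
--     moved = 0
--     if i_seq < 0:
--         return move
--     for i, c in enumerate(ts[i_seq:]):
--         if moved == move:
--             return i
--         if c != "-": moved +=1
-- ===== SOURCE B (Python) =====
-- def gapmove(i_seq, ts, move):
--     """
--     moves by *move* steps, respecting gaps.
--     """
--     if i_seq < 0:
--         return move
--     counts = []
--     n = 0
--     for c in ts[i_seq:]:
--         counts.append(n)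
--         n += c != "-"
--     if move in counts:
--         return counts.index(move)
--     return None
-- ===== Notes on version B (the rewrite author's own statement) =====
-- stated objective: alternative
-- what changed: Replaces A's early-return counting scan (a moved-counter compared against move at each step) by first tabulating the prefix counts of non-gap characters and then answering with a single list membership + index lookup.
import Mathlib
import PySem

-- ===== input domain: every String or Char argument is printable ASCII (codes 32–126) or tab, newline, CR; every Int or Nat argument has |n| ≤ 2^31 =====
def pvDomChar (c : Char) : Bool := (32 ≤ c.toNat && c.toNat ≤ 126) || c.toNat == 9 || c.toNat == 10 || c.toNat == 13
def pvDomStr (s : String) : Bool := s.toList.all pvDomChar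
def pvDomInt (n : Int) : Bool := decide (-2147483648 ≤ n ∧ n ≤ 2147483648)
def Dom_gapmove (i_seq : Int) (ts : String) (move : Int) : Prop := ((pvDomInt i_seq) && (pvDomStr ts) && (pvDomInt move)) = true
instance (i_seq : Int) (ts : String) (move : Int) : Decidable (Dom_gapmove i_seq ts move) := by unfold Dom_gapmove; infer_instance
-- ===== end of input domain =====

-- B replaces A's early-return counting scan by tabulating the prefix counts of
-- non-gap characters and answering with one membership + index lookup (alternative decomposition, same cost).

-- ===== PORT A =====
-- the 'for i, c in enumerate(ts[i_seq:])' loop with accumulator 'moved'; falls off the end → none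
def gapmoveLoopA : List (Int × Char) → Int → Int → Option Int
  | [], _, _ => none
  | (i, c) :: rest, moved, move =>
      if moved = move then some i
      else gapmoveLoopA rest (if c ≠ '-' then moved + 1 else moved) move

def gapmove (i_seq : Int) (ts : String) (move : Int) : Option Int :=
  if i_seq < 0 then some move
  else gapmoveLoopA (PySem.List.enumerate (PySem.List.slice ts.toList (some i_seq) none) 0) 0 move

-- ===== PORT B =====
-- the 'counts.append(n); n += c != "-"' loop of Source B
def gapmoveCounts : List Char → Int → List Int
  | [], _ => []
  | c :: rest, n => n :: gapmoveCounts rest (n + (if c ≠ '-' then 1 else 0))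

def gapmove_alt (i_seq : Int) (ts : String) (move : Int) : Option Int :=
  if i_seq < 0 then some move
  else
    let counts := gapmoveCounts (PySem.List.slice ts.toList (some i_seq) none) 0
    if move ∈ counts then (PySem.List.index? counts move).map (fun (n : Nat) => (n : Int))
    else none

-- ===== PRECONDITION & SPEC =====
def Spec_gapmove (i_seq : Int) (ts : String) (move : Int) (out : Option Int) : Prop := out = gapmove_alt i_seq ts move
instance (i_seq : Int) (ts : String) (move : Int) (out : Option Int) : Decidable (Spec_gapmove i_seq ts move out) := by unfold Spec_gapmove; infer_instance

-- ===== CLAIM (what is proved, stated in full; the proofs are below) =====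
def Claim_equal_gapmove : Prop := ∀ (i_seq : Int) (ts : String) (move : Int), Dom_gapmove i_seq ts move → Spec_gapmove i_seq ts move (gapmove i_seq ts move)

-- ===== LEMMAS AND PROOFS =====

-- A's loop equals a first-index lookup of 'move' in the prefix-count table, shifted by the enumeration start
lemma gapmove_loop_eq (move : Int) : ∀ (seq : List Char) (s moved : Int),
    gapmoveLoopA (PySem.List.enumerate seq s) moved move
      = (PySem.List.index? (gapmoveCounts seq moved) move).map (fun (n : Nat) => (n : Int) + s) := by
  intro seq
  induction seq with
  | nil =>
    intro s moved
    simp [PySem.List.enumerate_nil, gapmoveLoopA, gapmoveCounts,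
      PySem.List.index?_eq_idxOf?]
  | cons c rest ih =>
    intro s moved
    rw [PySem.List.enumerate_cons,
      show gapmoveCounts (c :: rest) moved
          = moved :: gapmoveCounts rest (moved + (if c ≠ '-' then 1 else 0)) from rfl]
    by_cases h : moved = move
    · rw [h, PySem.List.index?_cons_self]
      simp [gapmoveLoopA]
    · rw [PySem.List.index?_cons_of_ne _ h, Option.map_map]
      simp only [gapmoveLoopA, if_neg h, ih (s + 1),
        show (if c ≠ '-' then moved + 1 else moved) = moved + (if c ≠ '-' then 1 else 0) from
          by split <;> omega]
      apply Option.map_congr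
      intro n _
      simp
      ring

-- B's membership guard is redundant relative to index?
lemma gapmove_alt_lookup (counts : List Int) (move : Int) :
    (if move ∈ counts then (PySem.List.index? counts move).map (fun (n : Nat) => (n : Int)) else none)
      = (PySem.List.index? counts move).map (fun (n : Nat) => (n : Int)) := by
  by_cases h : move ∈ counts
  · rw [if_pos h]
  · rw [if_neg h, (PySem.List.index?_eq_none_iff _ _).mpr h]
    simp

-- ===== VERDICT (by name: the statement is the Claim_ definition above) =====
theorem gapmove_spec : Claim_equal_gapmove := by
  intro i_seq ts move _
  unfold Spec_gapmove gapmove gapmove_alt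
  by_cases h : i_seq < 0
  · simp [h]
  · simp only [if_neg h]
    rw [gapmove_alt_lookup, gapmove_loop_eq move _ 0 0]
    simp
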